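-- pv_equiv track=rewrite | github.com/EnzoBPavanelli/Sailor | AnguloFinal.py | angulosPossiveis
-- ===== SOURCE A (Python) =====
-- def angulosPossiveis(obstaclesHdg, windHdg):
--     angles = list(range(360))
--     angMinObs = 10
--
--     for i in range(45):
--         angles = [a for a in angles if a != (windHdg + i) % 360 and a != (windHdg - i) % 360]
--     tailHdg = (windHdg + 180) % 360
--     for i in range(15):
--         angles = [a for a in angles if a != (tailHdg + i) % 360 and a != (tailHdg - i) % 360]
--     for x in obstaclesHdg:
--         for i in range(angMinObs):
--             angles = [a for a in angles if a != (x + i) % 360 and a != (x - i) % 360]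
--
--     return angles
-- ===== SOURCE B (Python) =====
-- def angulosPossiveis(obstaclesHdg, windHdg):
--     blocked = [False] * 360
--     def mark(center, half):
--         for i in range(half):
--             blocked[(center + i) % 360] = True
--             blocked[(center - i) % 360] = True
--     mark(windHdg, 45)
--     mark(windHdg + 180, 15)
--     for x in obstaclesHdg:
--         mark(x, 10)
--     return [a for a in range(360) if not blocked[a]]
-- ===== Notes on version B (the rewrite author's own statement) =====
-- stated objective: faster
-- what changed: A rebuilds the whole candidate list by a fresh filtering pass for each of the 60+10*len(obstaclesHdg) removal steps; B marks removed headings once in a 360-slot boolean mask and emits the surviving angles in one ordered pass over 0..359.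
import Mathlib
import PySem

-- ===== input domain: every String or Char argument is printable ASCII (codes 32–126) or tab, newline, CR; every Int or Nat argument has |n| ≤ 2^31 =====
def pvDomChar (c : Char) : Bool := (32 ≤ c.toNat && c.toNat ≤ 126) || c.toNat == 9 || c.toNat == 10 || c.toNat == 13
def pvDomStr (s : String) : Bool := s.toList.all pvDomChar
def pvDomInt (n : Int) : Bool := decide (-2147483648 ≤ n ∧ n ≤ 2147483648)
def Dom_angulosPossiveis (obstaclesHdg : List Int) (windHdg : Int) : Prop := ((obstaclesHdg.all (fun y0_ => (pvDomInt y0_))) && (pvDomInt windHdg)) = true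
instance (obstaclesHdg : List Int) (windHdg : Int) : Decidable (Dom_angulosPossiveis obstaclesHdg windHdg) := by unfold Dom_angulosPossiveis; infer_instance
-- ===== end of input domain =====

-- B replaces A's repeated full-list rebuild-filters by a 360-slot boolean mask:
-- mark each removed heading once, then one ordered pass over 0..359 (objective: faster).


-- ===== PORT A =====
-- literal transliteration of A: start from list(range(360)) and repeatedly rebuild it
-- with a comprehension filtering out the two headings of the current step
def angulosPossiveis (obstaclesHdg : List Int) (windHdg : Int) : List Int :=
  let angles := PySem.List.pyRange 0 360 1
  let angles := (PySem.List.pyRange 0 45 1).foldl (fun angles i =>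
      angles.filter (fun a => a != PySem.Int.mod (windHdg + i) 360 && a != PySem.Int.mod (windHdg - i) 360)) angles
  let tailHdg := PySem.Int.mod (windHdg + 180) 360
  let angles := (PySem.List.pyRange 0 15 1).foldl (fun angles i =>
      angles.filter (fun a => a != PySem.Int.mod (tailHdg + i) 360 && a != PySem.Int.mod (tailHdg - i) 360)) angles
  let angles := obstaclesHdg.foldl (fun angles x =>
      (PySem.List.pyRange 0 10 1).foldl (fun angles i =>
        angles.filter (fun a => a != PySem.Int.mod (x + i) 360 && a != PySem.Int.mod (x - i) 360)) angles) angles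
  angles

-- ===== PORT B =====
-- blocked[idx] = True for idx = (center ± i) % 360: idx is in [0, 360) = [0, len(blocked)),
-- so Python's list assignment is exactly List.set at the Nat index idx.toNat
def pvMark (blocked : List Bool) (center : Int) (half : Int) : List Bool :=
  (PySem.List.pyRange 0 half 1).foldl (fun m i =>
    (m.set (PySem.Int.mod (center + i) 360).toNat true).set (PySem.Int.mod (center - i) 360).toNat true) blocked

def angulosPossiveis_alt (obstaclesHdg : List Int) (windHdg : Int) : List Int :=
  let blocked := List.replicate 360 false
  let blocked := pvMark blocked windHdg 45
  let blocked := pvMark blocked (windHdg + 180) 15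
  let blocked := obstaclesHdg.foldl (fun m x => pvMark m x 10) blocked
  (PySem.List.pyRange 0 360 1).filter (fun a => !(PySem.List.pyGetD blocked a false))

-- ===== PRECONDITION & SPEC =====
def Spec_angulosPossiveis (obstaclesHdg : List Int) (windHdg : Int) (out : List Int) : Prop := out = angulosPossiveis_alt obstaclesHdg windHdg
instance (obstaclesHdg : List Int) (windHdg : Int) (out : List Int) : Decidable (Spec_angulosPossiveis obstaclesHdg windHdg out) := by unfold Spec_angulosPossiveis; infer_instance

-- ===== CLAIM (what is proved, stated in full; the proofs are below) =====
def Claim_equal_angulosPossiveis : Prop := ∀ (obstaclesHdg : List Int) (windHdg : Int), Dom_angulosPossiveis obstaclesHdg windHdg → Spec_angulosPossiveis obstaclesHdg windHdg (angulosPossiveis obstaclesHdg windHdg)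

-- ===== LEMMAS AND PROOFS =====

-- a chain of filters over range n collapses into one filter with the conjunction
theorem pv_foldl_filter_range (n : Nat) (p : Nat → Int → Bool) (l : List Int) :
    (List.range n).foldl (fun acc i => acc.filter (p i)) l
      = l.filter (fun a => decide (∀ i, i < n → p i a = true)) := by
  induction n with
  | zero => simp
  | succ n ih =>
      rw [List.range_succ, List.foldl_append, ih]
      simp only [List.foldl_cons, List.foldl_nil, List.filter_filter]
      refine List.filter_congr fun a _ => ?_
      rw [Bool.eq_iff_iff]
      simp only [Bool.and_eq_true, decide_eq_true_iff]
      constructor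
      · rintro ⟨h1, h2⟩ i hi
        rcases Nat.lt_succ_iff_lt_or_eq.mp hi with h | rfl
        · exact h2 i h
        · exact h1
      · intro h
        exact ⟨h n (Nat.lt_succ_self n), fun i hi => h i (Nat.lt_succ_of_lt hi)⟩

theorem pv_foldl_filter_pyRange (h : Int) (p : Int → Int → Bool) (l : List Int) :
    (PySem.List.pyRange 0 h 1).foldl (fun acc i => acc.filter (p i)) l
      = l.filter (fun a => decide (∀ i : Nat, i < h.toNat → p i a = true)) := by
  rw [PySem.List.pyRange_zero, List.foldl_map, pv_foldl_filter_range]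

theorem pv_foldl_filter_list (obs : List Int) (q : Int → Int → Bool) (l : List Int) :
    obs.foldl (fun acc x => acc.filter (q x)) l = l.filter (fun a => obs.all (fun x => q x a)) := by
  induction obs generalizing l with
  | nil => simp
  | cons x obs ih =>
      rw [List.foldl_cons, ih, List.filter_filter]
      refine List.filter_congr fun a _ => ?_
      simp [Bool.and_comm]

theorem pv_mark_length (b : List Bool) (c h : Int) : (pvMark b c h).length = b.length := by
  unfold pvMark
  induction PySem.List.pyRange 0 h 1 generalizing b with
  | nil => rfl
  | cons i t ih => rw [List.foldl_cons, ih]; simp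

-- the Int-side "this slot got marked" condition
def pvHit (c h : Int) (j : Int) : Bool :=
  decide (∃ i : Nat, i < h.toNat ∧ (j = PySem.Int.mod (c + i) 360 ∨ j = PySem.Int.mod (c - i) 360))

theorem pv_getD_set (m : List Bool) (k j : Nat) (hk : k < m.length) :
    (m.set k true).getD j false = (m.getD j false || decide (j = k)) := by
  simp only [List.getD_eq_getElem?_getD, List.getElem?_set]
  by_cases hkj : k = j
  · subst hkj; simp [hk]
  · simp [hkj, Ne.symm hkj]

theorem pv_mod360_lt (a : Int) : PySem.Int.mod a 360 < 360 :=
  PySem.Int.mod_lt a (by norm_num)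

theorem pv_mod360_nonneg (a : Int) : 0 ≤ PySem.Int.mod a 360 :=
  PySem.Int.mod_nonneg a (by norm_num)

theorem pv_markN_foldl_length (c : Int) (r : List Nat) (b : List Bool) :
    ((r.foldl (fun m (k : Nat) =>
        (m.set (PySem.Int.mod (c + (k:Int)) 360).toNat true).set (PySem.Int.mod (c - (k:Int)) 360).toNat true) b)).length
      = b.length := by
  induction r generalizing b with
  | nil => rfl
  | cons i t ih => rw [List.foldl_cons, ih]; simp

theorem pv_markN_getD (c : Int) (n : Nat) (b : List Bool) (hb : b.length = 360) (j : Nat) :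
    ((List.range n).foldl (fun m (k : Nat) =>
        (m.set (PySem.Int.mod (c + (k:Int)) 360).toNat true).set (PySem.Int.mod (c - (k:Int)) 360).toNat true) b).getD j false
      = (b.getD j false
          || decide (∃ i : Nat, i < n ∧ ((j:Int) = PySem.Int.mod (c + i) 360 ∨ (j:Int) = PySem.Int.mod (c - i) 360))) := by
  induction n with
  | zero => simp
  | succ n ih =>
      rw [List.range_succ, List.foldl_append, List.foldl_cons, List.foldl_nil]
      have hlen : ((List.range n).foldl (fun m (k : Nat) =>
          (m.set (PySem.Int.mod (c + (k:Int)) 360).toNat true).set (PySem.Int.mod (c - (k:Int)) 360).toNat true) b).length = 360 := by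
        rw [pv_markN_foldl_length, hb]
      have hm1 := pv_mod360_nonneg (c + (n:Int))
      have hl1 := pv_mod360_lt (c + (n:Int))
      have hm2 := pv_mod360_nonneg (c - (n:Int))
      have hl2 := pv_mod360_lt (c - (n:Int))
      rw [pv_getD_set _ _ _ (by simp only [List.length_set, hlen]; omega),
          pv_getD_set _ _ _ (by rw [hlen]; omega), ih]
      cases hbj : b.getD j false with
      | true => simp
      | false =>
          rw [Bool.eq_iff_iff]
          simp only [Bool.false_or, Bool.or_assoc, Bool.or_eq_true, decide_eq_true_iff]
          constructor
          · rintro (⟨i, hi, hc⟩ | h1 | h2)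
            · exact ⟨i, Nat.lt_succ_of_lt hi, hc⟩
            · exact ⟨n, Nat.lt_succ_self n, Or.inl (by omega)⟩
            · exact ⟨n, Nat.lt_succ_self n, Or.inr (by omega)⟩
          · rintro ⟨i, hi, hc⟩
            rcases Nat.lt_succ_iff_lt_or_eq.mp hi with hi' | rfl
            · exact Or.inl ⟨i, hi', hc⟩
            · rcases hc with hc | hc
              · exact Or.inr (Or.inl (by omega))
              · exact Or.inr (Or.inr (by omega))

theorem pv_mark_getD (c h : Int) (b : List Bool) (hb : b.length = 360) (j : Nat) :
    (pvMark b c h).getD j false = (b.getD j false || pvHit c h (j : Int)) := by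
  unfold pvMark
  rw [PySem.List.pyRange_zero, List.foldl_map, pv_markN_getD c h.toNat b hb j]
  rfl

theorem pv_obs_fold_getD (obs : List Int) (b : List Bool) (hb : b.length = 360) (j : Nat) :
    ((obs.foldl (fun m x => pvMark m x 10) b).getD j false)
      = (b.getD j false || obs.any (fun x => pvHit x 10 (j : Int))) := by
  induction obs generalizing b with
  | nil => simp
  | cons x obs ih =>
      rw [List.foldl_cons, ih _ (by rw [pv_mark_length, hb]), pv_mark_getD _ _ _ hb]
      simp [Bool.or_assoc]

-- ===== VERDICT (by name: the statement is the Claim_ definition above) =====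
theorem pv_mod360_eq_emod (x : Int) : PySem.Int.mod x 360 = x % 360 :=
  PySem.Int.mod_eq_emod_of_pos (by norm_num)

theorem pv_mod_center_add (c i : Int) :
    PySem.Int.mod (PySem.Int.mod c 360 + i) 360 = PySem.Int.mod (c + i) 360 := by
  simp only [pv_mod360_eq_emod]; omega

theorem pv_mod_center_sub (c i : Int) :
    PySem.Int.mod (PySem.Int.mod c 360 - i) 360 = PySem.Int.mod (c - i) 360 := by
  simp only [pv_mod360_eq_emod]; omega

-- one removal band: "survives every step i < h" is the negation of "some step hits a"
theorem pv_seg (c hh a : Int) :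
    (decide (∀ i : Nat, i < hh.toNat →
        (a != PySem.Int.mod (c + (i:Int)) 360 && a != PySem.Int.mod (c - (i:Int)) 360) = true))
      = !pvHit c hh a := by
  rw [Bool.eq_iff_iff]
  simp only [decide_eq_true_iff, Bool.not_eq_true', decide_eq_false_iff_not, pvHit,
    not_exists, not_and, not_or, Bool.and_eq_true, bne_iff_ne, ne_eq]

theorem angulosPossiveis_spec : Claim_equal_angulosPossiveis := by
  intro obs w _
  show angulosPossiveis obs w = angulosPossiveis_alt obs w
  simp only [angulosPossiveis, angulosPossiveis_alt]
  rw [pv_foldl_filter_pyRange, pv_foldl_filter_pyRange]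
  have hstep : (fun (angles : List Int) (x : Int) =>
      (PySem.List.pyRange 0 10 1).foldl (fun angles i =>
        angles.filter (fun a => a != PySem.Int.mod (x + i) 360 && a != PySem.Int.mod (x - i) 360)) angles)
      = (fun (angles : List Int) (x : Int) =>
        angles.filter (fun a => decide (∀ i : Nat, i < (10:Int).toNat →
          ((a != PySem.Int.mod (x + i) 360 && a != PySem.Int.mod (x - i) 360) = true)))) := by
    funext angles x
    exact pv_foldl_filter_pyRange 10 _ angles
  rw [hstep, pv_foldl_filter_list, List.filter_filter, List.filter_filter]
  refine List.filter_congr fun a ha => ?_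
  obtain ⟨ha0, ha360⟩ := PySem.List.mem_pyRange_one.mp ha
  rw [PySem.List.pyGetD_of_nonneg _ _ ha0]
  rw [pv_obs_fold_getD _ _ (by rw [pv_mark_length, pv_mark_length, List.length_replicate]) _,
      pv_mark_getD _ _ _ (by rw [pv_mark_length, List.length_replicate]) _,
      pv_mark_getD _ _ _ (List.length_replicate) _]
  rw [Int.toNat_of_nonneg ha0]
  simp only [List.getD_eq_getElem?_getD, List.getElem?_replicate,
    if_pos (show a.toNat < 360 by omega), Option.getD_some, Bool.false_or]
  simp only [pv_mod_center_add, pv_mod_center_sub, pv_seg]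
  rw [Bool.eq_iff_iff]
  simp only [Bool.and_eq_true, Bool.or_eq_false_iff, List.all_eq_true, List.any_eq_false,
    Bool.not_eq_eq_eq_not, Bool.not_true, Bool.not_eq_true]
  tauto
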